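-- pv_equiv track=rewrite | github.com/jirogihub8/CODE | THPT QUOC GIA HA NOI 2025/RC.py | forest_diff_no_get
-- ===== SOURCE A (Python) =====
-- def forest_diff_no_get(N, B, C):
--     # Bước 1: Ghép lại và sắp xếp theo chiều cao tăng
--     trees = sorted([(C[i], B[i]) for i in range(N)])
--
--     total_cnt = 0
--     total_sum = 0
--     cnt_type = {}
--     sum_type = {}
--     ans = 0
--
--     i = 0
--     while i < N:
--         j = i
--         same = []
--         # Gom nhóm các cây có cùng chiều cao
--         while j < N and trees[j][0] == trees[i][0]:
--             same.append(trees[j])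
--             j += 1
--
--         # Bước 2: Tính chênh lệch cho nhóm này
--         for c, b in same:
--             # nếu cây b có trong cnt_type(hay đã gặp 1 lần)
--             # cnt_b=cây b
--             if b in cnt_type:
--                 cnt_b = cnt_type[b]
--             else:
--                 cnt_b = 0
--             #nếu cây b có trong sum_type(hay đã gặp 1 lần)
--             #sum_type=tổng chiều cao các cây b đã gặp
--             if b in sum_type:
--                 sum_b = sum_type[b]
--             else: sum_b = 0
--
--             ans += c * (total_cnt - cnt_b) - (total_sum - sum_b)
--
--         # Bước 3: Cập nhật sau khi xét nhóm
--
--         for c, b in same: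
--             #nếu như cây b chưa bao giờ xuất hiện thì thêm cây b vào:
--             if b not in cnt_type:
--                 cnt_type[b] = 0 # cnt_type là : số lượng cây b đã gặp
--                 sum_type[b] = 0 # sum_type là : chiều cao của cây b đã gặp
--             cnt_type[b] += 1
--             sum_type[b] += c
--             total_cnt += 1 # số cây đã gặp
--             total_sum += c # số chiều cao đã gặp
--
--         i = j
--
--     return ans
-- ===== SOURCE B (Python) =====
-- def forest_diff_no_get(N, B, C):
--     # Subtractive decomposition: answer = (all-pairs |height diff| sum over the
--     # whole forest) minus (the same sum within each type); each total comes from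
--     # the sorted prefix-sum formula, with no running cross-type dicts.
--     all_heights = []
--     heights_by_type = {}
--     for i in range(N):
--         all_heights.append(C[i])
--         heights_by_type.setdefault(B[i], []).append(C[i])
--
--     def allpairs_absdiff(heights):
--         total = 0
--         cnt = 0
--         pre = 0
--         for h in sorted(heights):
--             total += h * cnt - pre
--             cnt += 1
--             pre += h
--         return total
--
--     ans = allpairs_absdiff(all_heights)
--     for hs in heights_by_type.values():
--         ans -= allpairs_absdiff(hs)
--     return ans
-- ===== Notes on version B (the rewrite author's own statement) =====
-- stated objective: faster
-- what changed: A makes one sorted pass over (height,type) pairs, grouping equal-height runs and maintaining running per-type count/sum dicts to accumulate cross-type differences incrementally; B instead groups heights by type in one dict-of-lists pass, computes the all-pairs |height difference| total with the sorted prefix-sum formula, and subtracts the same within-type totals.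
import Mathlib
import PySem

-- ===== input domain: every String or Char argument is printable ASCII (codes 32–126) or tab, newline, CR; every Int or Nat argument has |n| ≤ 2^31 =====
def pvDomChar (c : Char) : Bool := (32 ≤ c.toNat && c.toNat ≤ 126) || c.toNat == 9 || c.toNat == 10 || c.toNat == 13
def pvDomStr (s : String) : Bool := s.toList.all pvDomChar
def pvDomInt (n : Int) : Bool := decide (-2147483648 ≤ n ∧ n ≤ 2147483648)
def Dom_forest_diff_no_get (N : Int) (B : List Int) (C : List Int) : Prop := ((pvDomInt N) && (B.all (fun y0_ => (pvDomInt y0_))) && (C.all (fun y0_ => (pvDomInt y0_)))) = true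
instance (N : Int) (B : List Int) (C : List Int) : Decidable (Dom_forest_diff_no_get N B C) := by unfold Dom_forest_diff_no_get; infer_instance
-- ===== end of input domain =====

-- B replaces A's sorted group scan with running per-type dicts by a subtractive
-- decomposition: (all-pairs |height diff| via the sorted prefix-sum formula) minus
-- the same within-type totals from a dict-of-lists grouping; measured faster by a
-- constant factor (the hot loop has no per-element dict bookkeeping).

-- ===== PORT A =====
-- inner while loop gathering the run of equal heights ('same')
def aSpan (c : Int) : List (Int × Int) → List (Int × Int) × List (Int × Int)
  | [] => ([], [])
  | x :: xs =>
    if x.1 = c then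
      let r := aSpan c xs
      (x :: r.1, r.2)
    else ([], x :: xs)

theorem aSpan_snd_length_le (c : Int) (xs : List (Int × Int)) :
    (aSpan c xs).2.length ≤ xs.length := by
  induction xs with
  | nil => simp [aSpan]
  | cons x xs ih => by_cases h : x.1 = c <;> simp [aSpan, h] <;> omega

-- body of A's step-3 update loop: state ((cnt_type, sum_type), total_cnt, total_sum)
def aStep : ((PySem.Dict Int Int × PySem.Dict Int Int) × Int × Int) → (Int × Int) →
    ((PySem.Dict Int Int × PySem.Dict Int Int) × Int × Int) :=
  fun s cb =>
    let ct := if s.1.1.contains cb.2 = false then s.1.1.insert cb.2 0 else s.1.1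
    let smt := if s.1.1.contains cb.2 = false then s.1.2.insert cb.2 0 else s.1.2
    ((ct.modify cb.2 0 (· + 1), smt.modify cb.2 0 (· + cb.1)), s.2.1 + 1, s.2.2 + cb.1)

-- outer while loop of A: state (total_cnt, total_sum, cnt_type, sum_type, ans)
def aLoop : List (Int × Int) → Int → Int → PySem.Dict Int Int → PySem.Dict Int Int → Int → Int
  | [], _, _, _, _, ans => ans
  | x :: rest, totalCnt, totalSum, cntType, sumType, ans =>
    let same := x :: (aSpan x.1 rest).1
    let ans2 := same.foldl (fun a cb =>
      a + (cb.1 * (totalCnt - cntType.getD cb.2 0) - (totalSum - sumType.getD cb.2 0))) ans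
    let st := same.foldl aStep ((cntType, sumType), totalCnt, totalSum)
    aLoop (aSpan x.1 rest).2 st.2.1 st.2.2 st.1.1 st.1.2 ans2
termination_by l => l.length
decreasing_by simpa using Nat.lt_succ_of_le (aSpan_snd_length_le x.1 rest)

-- C[i]/B[i] ported with pyGetD (total form); Pre_ keeps every index in range
def forest_diff_no_get (N : Int) (B : List Int) (C : List Int) : Int :=
  let trees := PySem.List.sorted2
    ((PySem.List.pyRange 0 N 1).map (fun i => (PySem.List.pyGetD C i 0, PySem.List.pyGetD B i 0)))
    Prod.fst Prod.snd
  aLoop trees 0 0 PySem.Dict.empty PySem.Dict.empty 0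

-- ===== PORT B =====
-- allpairs_absdiff: sort ascending, then total += h*cnt - pre
def bScan (heights : List Int) : Int :=
  ((PySem.List.sorted heights (fun h => h)).foldl
    (fun (s : Int × Int × Int) h => (s.1 + (h * s.2.1 - s.2.2), s.2.1 + 1, s.2.2 + h))
    (0, 0, 0)).1

def forest_diff_no_get_alt (N : Int) (B : List Int) (C : List Int) : Int :=
  -- one pass building all_heights and heights_by_type (setdefault(...).append)
  let s := (PySem.List.pyRange 0 N 1).foldl
    (fun (s : List Int × PySem.Dict Int (List Int)) i =>
      (s.1 ++ [PySem.List.pyGetD C i 0],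
       s.2.modify (PySem.List.pyGetD B i 0) [] (· ++ [PySem.List.pyGetD C i 0])))
    ([], PySem.Dict.empty)
  let ans := bScan s.1
  (PySem.Dict.values s.2).foldl (fun a hs => a - bScan hs) ans

-- ===== PRECONDITION & SPEC =====
-- Pre_ excludes exactly the inputs where A raises IndexError: N larger than
-- len(B) or len(C), so some C[i]/B[i] with i in range(N) is out of range
-- (B raises the same IndexError there).
def Pre_forest_diff_no_get (N : Int) (B : List Int) (C : List Int) : Prop :=
  N ≤ (B.length : Int) ∧ N ≤ (C.length : Int)
instance (N : Int) (B : List Int) (C : List Int) : Decidable (Pre_forest_diff_no_get N B C) := by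
  unfold Pre_forest_diff_no_get; infer_instance

def pvWitness_forest_diff_no_get : Int × List Int × List Int := (3, [1, 1, 2], [5, 2, 9])

def Spec_forest_diff_no_get (N : Int) (B : List Int) (C : List Int) (out : Int) : Prop := out = forest_diff_no_get_alt N B C
instance (N : Int) (B : List Int) (C : List Int) (out : Int) : Decidable (Spec_forest_diff_no_get N B C out) := by unfold Spec_forest_diff_no_get; infer_instance

-- ===== CLAIM (what is proved, stated in full; the proofs are below) =====
def Claim_equal_forest_diff_no_get : Prop := ∀ (N : Int) (B : List Int) (C : List Int), Dom_forest_diff_no_get N B C → Pre_forest_diff_no_get N B C → Spec_forest_diff_no_get N B C (forest_diff_no_get N B C)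

-- ===== LEMMAS AND PROOFS =====
-- generic sum over unordered pairs (head paired with each later element)
def pairsSum {α : Type} (f : α → α → Int) : List α → Int
  | [] => 0
  | x :: xs => (xs.map (f x)).sum + pairsSum f xs

theorem pairsSum_append_singleton {α : Type} (f : α → α → Int) (P : List α) (x : α) :
    pairsSum f (P ++ [x]) = pairsSum f P + (P.map (fun p => f p x)).sum := by
  induction P with
  | nil => simp [pairsSum]
  | cons p P ih => simp [pairsSum, ih]; ring

def accPair {α : Type} (f : α → α → Int) : List α → List α → Int
  | _, [] => 0
  | P, x :: xs => (P.map (fun p => f p x)).sum + accPair f (P ++ [x]) xs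

theorem accPair_eq {α : Type} (f : α → α → Int) (P R : List α) :
    accPair f P R = pairsSum f (P ++ R) - pairsSum f P := by
  induction R generalizing P with
  | nil => simp [accPair]
  | cons x xs ih =>
    have h : P ++ x :: xs = (P ++ [x]) ++ xs := by simp
    rw [accPair, ih (P ++ [x]), h, pairsSum_append_singleton]; ring

theorem pairsSum_perm {α : Type} (f : α → α → Int) (hs : ∀ a b, f a b = f b a)
    {l l' : List α} (h : l.Perm l') : pairsSum f l = pairsSum f l' := by
  induction h with
  | nil => rfl
  | cons x h ih => simp [pairsSum, ih, (h.map (f x)).sum_eq]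
  | swap a b l => simp [pairsSum, hs a b]; ring
  | trans h1 h2 ih1 ih2 => exact ih1.trans ih2

theorem pairsSum_congr {α : Type} (f g : α → α → Int) (h : ∀ a b, f a b = g a b)
    (l : List α) : pairsSum f l = pairsSum g l := by
  have : f = g := funext fun a => funext (h a)
  rw [this]

theorem pairsSum_add {α : Type} (f g : α → α → Int) (l : List α) :
    pairsSum (fun a b => f a b + g a b) l = pairsSum f l + pairsSum g l := by
  induction l with
  | nil => simp [pairsSum]
  | cons x xs ih => simp [pairsSum, ih]; ring

theorem pairsSum_map {α β : Type} (f : β → β → Int) (g : α → β) (l : List α) :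
    pairsSum f (l.map g) = pairsSum (fun a b => f (g a) (g b)) l := by
  induction l with
  | nil => simp [pairsSum]
  | cons x xs ih => simp [pairsSum, ih, List.map_map]; rfl
theorem sum_abs_of_le (P : List Int) (h : Int) (hb : ∀ p ∈ P, p ≤ h) :
    (P.map (fun p => |h - p|)).sum = h * (P.length : Int) - P.sum := by
  induction P with
  | nil => simp
  | cons p P ih =>
    have h1 : |h - p| = h - p := abs_of_nonneg (by have := hb p (by simp); omega)
    rw [List.map_cons, List.sum_cons, ih (fun q hq => hb q (by simp [hq]))]
    simp [h1]; push_cast; ring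

theorem scan_inv (hs : List Int) : ∀ (P : List Int) (a : Int),
    (∀ p ∈ P, ∀ h ∈ hs, p ≤ h) → hs.Pairwise (· ≤ ·) →
    ((hs.foldl (fun (s : Int × Int × Int) h => (s.1 + (h * s.2.1 - s.2.2), s.2.1 + 1, s.2.2 + h))
      (a, (P.length : Int), P.sum)).1) = a + accPair (fun p h => |h - p|) P hs := by
  induction hs with
  | nil => intro P a _ _; simp [accPair]
  | cons h hs ih =>
    intro P a hb hp
    have hstate : ((a + (h * (P.length : Int) - P.sum), (P.length : Int) + 1, P.sum + h) :
        Int × Int × Int)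
        = (a + (h * (P.length : Int) - P.sum), ((P ++ [h]).length : Int), (P ++ [h]).sum) := by
      simp
    rw [List.foldl_cons]
    simp only []
    rw [hstate, ih (P ++ [h]) _ ?_ hp.of_cons]
    · rw [accPair, sum_abs_of_le P h (fun p hp' => hb p hp' h (by simp))]
      ring
    · intro p hp' h' hh'
      rcases List.mem_append.mp hp' with h1 | h1
      · exact hb p h1 h' (by simp [hh'])
      · simp at h1; subst h1; exact (List.pairwise_cons.mp hp).1 h' hh'

theorem bScan_eq (hs : List Int) : bScan hs = pairsSum (fun p h => |h - p|) hs := by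
  have h0 : ((0 : Int), (0 : Int), (0 : Int))
      = ((0 : Int), (([] : List Int).length : Int), ([] : List Int).sum) := by simp
  have hp : (PySem.List.sorted hs (fun h => h)).Pairwise (· ≤ ·) := by
    simpa using PySem.List.sorted_pairwise hs (fun h => h)
  have := scan_inv (PySem.List.sorted hs (fun h => h)) [] 0 (by simp) hp
  rw [bScan, h0, this, accPair_eq]
  simp [pairsSum]
  exact pairsSum_perm _ (fun a b => by rw [abs_sub_comm]) (PySem.List.sorted_perm hs _ _)
theorem aSpan_append (c : Int) (xs : List (Int × Int)) :
    (aSpan c xs).1 ++ (aSpan c xs).2 = xs := by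
  induction xs with
  | nil => simp [aSpan]
  | cons x xs ih => by_cases h : x.1 = c <;> simp [aSpan, h, ih]

theorem aSpan_fst_eq (c : Int) (xs : List (Int × Int)) :
    ∀ p ∈ (aSpan c xs).1, p.1 = c := by
  induction xs with
  | nil => simp [aSpan]
  | cons x xs ih =>
    by_cases h : x.1 = c
    · simp only [aSpan, if_pos h]
      intro p hp
      rcases List.mem_cons.mp hp with h1 | h1
      · rw [h1]; exact h
      · exact ih p h1
    · simp [aSpan, h]

theorem contrib_eq (P : List (Int × Int)) (c b : Int) :
    c * ((P.length : Int) - ((P.filter (fun p => p.2 == b)).length : Int))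
      - ((P.map (fun p => p.1)).sum - ((P.filter (fun p => p.2 == b)).map (fun p => p.1)).sum)
    = (P.map (fun p => if p.2 = b then 0 else c - p.1)).sum := by
  induction P with
  | nil => simp
  | cons p P ih =>
    by_cases h : p.2 = b
    · simp only [List.filter_cons, h, beq_self_eq_true, if_true, List.map_cons, List.sum_cons,
        List.length_cons, if_pos h]
      push_cast
      rw [← ih]; push_cast; ring
    · have hb : (p.2 == b) = false := beq_eq_false_iff_ne.mpr h
      simp only [List.filter_cons, hb, Bool.false_eq_true, if_false, List.map_cons,
        List.sum_cons, List.length_cons, if_neg h]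
      rw [← ih]; push_cast; ring
theorem updFold (l : List (Int × Int)) :
    ∀ (ct st : PySem.Dict Int Int) (tc ts : Int),
    (∀ b, st.contains b = ct.contains b) →
    (l.foldl aStep ((ct, st), tc, ts)).2.1 = tc + (l.length : Int) ∧
    (l.foldl aStep ((ct, st), tc, ts)).2.2 = ts + (l.map (fun p => p.1)).sum ∧
    (∀ b, (l.foldl aStep ((ct, st), tc, ts)).1.1.getD b 0
        = ct.getD b 0 + ((l.filter (fun p => p.2 == b)).length : Int)) ∧
    (∀ b, (l.foldl aStep ((ct, st), tc, ts)).1.2.getD b 0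
        = st.getD b 0 + ((l.filter (fun p => p.2 == b)).map (fun p => p.1)).sum) ∧
    (∀ b, (l.foldl aStep ((ct, st), tc, ts)).1.2.contains b
        = (l.foldl aStep ((ct, st), tc, ts)).1.1.contains b) := by
  induction l with
  | nil => intro ct st tc ts hsync; simpa using fun b => hsync b
  | cons cb l ih =>
    intro ct st tc ts hsync
    rw [List.foldl_cons]
    have hctI : ∀ b, (if ct.contains cb.2 = false then ct.insert cb.2 0 else ct).getD b 0
        = ct.getD b 0 := by
      intro b
      by_cases hc : ct.contains cb.2 = false
      · rw [if_pos hc, PySem.Dict.getD_insert]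
        split_ifs with hb
        · subst hb; exact (PySem.Dict.getD_of_not_contains ct 0 hc).symm
        · rfl
      · rw [if_neg hc]
    have hstI : ∀ b, (if ct.contains cb.2 = false then st.insert cb.2 0 else st).getD b 0
        = st.getD b 0 := by
      intro b
      by_cases hc : ct.contains cb.2 = false
      · rw [if_pos hc, PySem.Dict.getD_insert]
        split_ifs with hb
        · subst hb
          exact (PySem.Dict.getD_of_not_contains st 0 ((hsync cb.2).trans hc)).symm
        · rfl
      · rw [if_neg hc]
    have hstep : aStep ((ct, st), tc, ts) cb
        = ((((if ct.contains cb.2 = false then ct.insert cb.2 0 else ct).modify cb.2 0 (· + 1)),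
            ((if ct.contains cb.2 = false then st.insert cb.2 0 else st).modify cb.2 0 (· + cb.1))),
           tc + 1, ts + cb.1) := rfl
    rw [hstep]
    have hsync' : ∀ b,
        ((if ct.contains cb.2 = false then st.insert cb.2 0 else st).modify cb.2 0
          (· + cb.1)).contains b
        = ((if ct.contains cb.2 = false then ct.insert cb.2 0 else ct).modify cb.2 0
          (· + 1)).contains b := by
      intro b
      rw [PySem.Dict.contains_modify, PySem.Dict.contains_modify]
      by_cases hc : ct.contains cb.2 = false
      · rw [if_pos hc, if_pos hc, PySem.Dict.contains_insert, PySem.Dict.contains_insert, hsync b]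
      · rw [if_neg hc, if_neg hc, hsync b]
    obtain ⟨h1, h2, h3, h4, h5⟩ := ih _ _ (tc + 1) (ts + cb.1) hsync'
    refine ⟨?_, ?_, ?_, ?_, h5⟩
    · rw [h1]; push_cast [List.length_cons]; ring
    · rw [h2]; simp; ring
    · intro b
      rw [h3 b, PySem.Dict.getD_modify]
      by_cases hb : b = cb.2
      · subst hb
        rw [if_pos rfl, hctI cb.2, List.filter_cons,
          if_pos (by simpa using rfl)]
        push_cast [List.length_cons]; ring
      · have hbb : (cb.2 == b) = false := beq_eq_false_iff_ne.mpr (fun h => hb h.symm)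
        rw [if_neg hb, hctI b, List.filter_cons, hbb]
        simp
    · intro b
      rw [h4 b, PySem.Dict.getD_modify]
      by_cases hb : b = cb.2
      · subst hb
        rw [if_pos rfl, hstI cb.2, List.filter_cons, if_pos (by simpa using rfl)]
        simp; ring
      · have hbb : (cb.2 == b) = false := beq_eq_false_iff_ne.mpr (fun h => hb h.symm)
        rw [if_neg hb, hstI b, List.filter_cons, hbb]
        simp
theorem accPair_append {α : Type} (f : α → α → Int) (L1 : List α) :
    ∀ (P L2 : List α), accPair f P (L1 ++ L2) = accPair f P L1 + accPair f (P ++ L1) L2 := by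
  induction L1 with
  | nil => intro P L2; simp [accPair]
  | cons x xs ih =>
    intro P L2
    rw [List.cons_append, accPair, accPair, ih (P ++ [x]) L2]
    simp [add_assoc]

theorem accPair_split {α : Type} (f : α → α → Int) (L : List α)
    (h0 : ∀ a ∈ L, ∀ b ∈ L, f a b = 0) :
    ∀ P, accPair f P L = (L.map (fun y => (P.map (fun p => f p y)).sum)).sum := by
  induction L with
  | nil => intro P; simp [accPair]
  | cons x xs ih =>
    intro P
    rw [accPair, ih (fun a ha b hb => h0 a (by simp [ha]) b (by simp [hb])) (P ++ [x])]
    have hcg : ∀ y ∈ xs, ((P ++ [x]).map (fun p => f p y)).sum = (P.map (fun p => f p y)).sum := by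
      intro y hy
      rw [List.map_append, List.sum_append]
      simp [h0 x (by simp) y (by simp [hy])]
    rw [List.map_congr_left (fun y hy => hcg y hy)]
    simp

theorem insertBy_pairwise_fst (bf : Int × Int → Int × Int → Bool)
    (hT : ∀ a b, bf a b = true → a.1 ≤ b.1) (hF : ∀ a b, bf a b = false → b.1 ≤ a.1)
    (x : Int × Int) : ∀ (ys : List (Int × Int)),
    ys.Pairwise (fun a b => a.1 ≤ b.1) →
    (PySem.List.insertBy bf x ys).Pairwise (fun a b => a.1 ≤ b.1) := by
  intro ys
  induction ys with
  | nil => intro _; simp [PySem.List.insertBy]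
  | cons y ys ih =>
    intro h
    rw [PySem.List.insertBy]
    obtain ⟨hy, hys⟩ := List.pairwise_cons.mp h
    by_cases hb : bf x y = true
    · rw [if_pos hb]
      refine List.pairwise_cons.mpr ⟨?_, h⟩
      intro z hz
      rcases List.mem_cons.mp hz with h1 | h1
      · rw [h1]; exact hT x y hb
      · exact le_trans (hT x y hb) (hy z h1)
    · rw [if_neg hb]
      refine List.pairwise_cons.mpr ⟨?_, ih hys⟩
      intro z hz
      rcases (PySem.List.insertBy_mem_iff bf x z ys).mp hz with h1 | h1
      · rw [h1]; exact hF x y (by simpa using hb)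
      · exact hy z h1
theorem sorted2_fst_pairwise (xs : List (Int × Int)) :
    (PySem.List.sorted2 xs Prod.fst Prod.snd false).Pairwise (fun a b => a.1 ≤ b.1) := by
  have hT : ∀ a b : Int × Int,
      (decide (a.1 < b.1) || (!decide (b.1 < a.1) && decide (a.2 < b.2))) = true →
      a.1 ≤ b.1 := by
    intro a b h
    simp only [Bool.or_eq_true, Bool.and_eq_true, Bool.not_eq_true', decide_eq_true_eq,
      decide_eq_false_iff_not] at h
    rcases h with h | ⟨h, _⟩ <;> omega
  have hF : ∀ a b : Int × Int,
      (decide (a.1 < b.1) || (!decide (b.1 < a.1) && decide (a.2 < b.2))) = false →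
      b.1 ≤ a.1 := by
    intro a b h
    simp only [Bool.or_eq_false_iff, decide_eq_false_iff_not] at h
    omega
  have key : ∀ (l acc : List (Int × Int)), acc.Pairwise (fun a b => a.1 ≤ b.1) →
      (l.foldl (fun acc x => PySem.List.insertBy
        (fun a b => decide (a.1 < b.1) || (!decide (b.1 < a.1) && decide (a.2 < b.2))) x acc)
        acc).Pairwise (fun a b => a.1 ≤ b.1) := by
    intro l
    induction l with
    | nil => intro acc h; simpa using h
    | cons x xs ih =>
      intro acc h
      rw [List.foldl_cons]
      exact ih _ (insertBy_pairwise_fst _ hT hF x acc h)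
  simpa [PySem.List.sorted2] using key xs [] (by simp)
-- the cross-type contribution of an ordered pair (earlier p, later y)
def fC (p y : Int × Int) : Int := if p.2 = y.2 then 0 else |y.1 - p.1|

theorem aLoop_inv : ∀ (n : Nat) (R P : List (Int × Int)) (ct st : PySem.Dict Int Int) (ans : Int),
    R.length ≤ n →
    (∀ p ∈ P, ∀ r ∈ R, p.1 ≤ r.1) →
    R.Pairwise (fun a b => a.1 ≤ b.1) →
    (∀ b, ct.getD b 0 = ((P.filter (fun p => p.2 == b)).length : Int)) →
    (∀ b, st.getD b 0 = ((P.filter (fun p => p.2 == b)).map (fun p => p.1)).sum) →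
    (∀ b, st.contains b = ct.contains b) →
    aLoop R (P.length : Int) ((P.map (fun p => p.1)).sum) ct st ans = ans + accPair fC P R := by
  intro n
  induction n with
  | zero =>
    intro R P ct st ans hn
    have : R = [] := List.eq_nil_of_length_eq_zero (Nat.le_zero.mp hn)
    subst this
    intro _ _ _ _ _
    simp [aLoop, accPair]
  | succ n ih =>
    intro R P ct st ans hn hord hRp hct hst hsync
    match R with
    | [] => simp [aLoop, accPair]
    | x :: rest =>
      set g := (aSpan x.1 rest).1 with hg
      set rem := (aSpan x.1 rest).2 with hrem
      set S : List (Int × Int) := x :: g with hS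
      have hrest : g ++ rem = rest := aSpan_append x.1 rest
      have hx : ∀ r ∈ rest, x.1 ≤ r.1 := (List.pairwise_cons.mp hRp).1
      have hrestp : rest.Pairwise (fun a b => a.1 ≤ b.1) := (List.pairwise_cons.mp hRp).2
      have hremp : rem.Pairwise (fun a b => a.1 ≤ b.1) := by
        have := hrest ▸ hrestp
        exact (List.pairwise_append.mp this).2.1
      have hS1 : ∀ p ∈ S, p.1 = x.1 := by
        intro p hp
        rcases List.mem_cons.mp hp with h1 | h1
        · rw [h1]
        · exact aSpan_fst_eq x.1 rest p h1
      have hordS : ∀ p ∈ P, ∀ s ∈ S, p.1 ≤ s.1 := by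
        intro p hp s hs
        rw [hS1 s hs]
        exact hord p hp x (by simp)
      -- one unfolding of the while loop
      have hunf : aLoop (x :: rest) (P.length : Int) ((P.map (fun p => p.1)).sum) ct st ans
          = aLoop rem
              (S.foldl aStep ((ct, st), (P.length : Int), (P.map (fun p => p.1)).sum)).2.1
              (S.foldl aStep ((ct, st), (P.length : Int), (P.map (fun p => p.1)).sum)).2.2
              (S.foldl aStep ((ct, st), (P.length : Int), (P.map (fun p => p.1)).sum)).1.1
              (S.foldl aStep ((ct, st), (P.length : Int), (P.map (fun p => p.1)).sum)).1.2
              (S.foldl (fun a cb =>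
                a + (cb.1 * ((P.length : Int) - ct.getD cb.2 0)
                  - ((P.map (fun p => p.1)).sum - st.getD cb.2 0))) ans) := by
        rw [aLoop]
      rw [hunf]
      -- the answer accumulation
      have hans : (S.foldl (fun a cb =>
            a + (cb.1 * ((P.length : Int) - ct.getD cb.2 0)
              - ((P.map (fun p => p.1)).sum - st.getD cb.2 0))) ans)
          = ans + accPair fC P S := by
        rw [PySem.List.foldl_add]
        congr 1
        rw [accPair_split fC S (fun a ha b hb => by
          simp [fC, hS1 a ha, hS1 b hb]) P]
        refine congrArg List.sum (List.map_congr_left ?_)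
        intro cb hcb
        rw [hct cb.2, hst cb.2, contrib_eq P cb.1 cb.2]
        refine congrArg List.sum (List.map_congr_left ?_)
        intro p hp
        by_cases hpb : p.2 = cb.2
        · simp [fC, hpb]
        · rw [if_neg hpb, fC, if_neg hpb,
            abs_of_nonneg (by have := hordS p hp cb hcb; omega)]
      -- the state fold
      obtain ⟨h1, h2, h3, h4, h5⟩ :=
        updFold S ct st (P.length : Int) ((P.map (fun p => p.1)).sum) hsync
      have hlen : (P.length : Int) + (S.length : Int) = (((P ++ S).length : Nat) : Int) := by
        push_cast [List.length_append]; ring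
      have hsum : (P.map (fun p => p.1)).sum + (S.map (fun p => p.1)).sum
          = ((P ++ S).map (fun p => p.1)).sum := by simp
      have hct' : ∀ b, (S.foldl aStep ((ct, st), (P.length : Int),
            (P.map (fun p => p.1)).sum)).1.1.getD b 0
          = (((P ++ S).filter (fun p => p.2 == b)).length : Int) := by
        intro b
        rw [h3 b, hct b, List.filter_append]
        push_cast [List.length_append]; ring
      have hst' : ∀ b, (S.foldl aStep ((ct, st), (P.length : Int),
            (P.map (fun p => p.1)).sum)).1.2.getD b 0
          = (((P ++ S).filter (fun p => p.2 == b)).map (fun p => p.1)).sum := by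
        intro b
        rw [h4 b, hst b, List.filter_append]
        simp
      have hmemrem : ∀ r ∈ rem, r ∈ rest := by
        intro r hr
        rw [← hrest]
        exact List.mem_append.mpr (Or.inr hr)
      have hord' : ∀ p ∈ P ++ S, ∀ r ∈ rem, p.1 ≤ r.1 := by
        intro p hp r hr
        rcases List.mem_append.mp hp with h6 | h6
        · exact hord p h6 r (by simp [hmemrem r hr])
        · rw [hS1 p h6]; exact hx r (hmemrem r hr)
      have hnlen : rem.length ≤ n := by
        have h7 : rem.length ≤ rest.length := by
          rw [hrem]; exact aSpan_snd_length_le x.1 rest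
        simp only [List.length_cons] at hn
        omega
      rw [hans, h1, h2, hlen, hsum, ih rem (P ++ S) _ _ _ hnlen hord' hremp hct' hst'
        (fun b => h5 b)]
      have hsplit : S ++ rem = x :: rest := by
        rw [hS]; simp [hrest]
      rw [← hsplit, accPair_append fC S P rem]
      ring
theorem fC_symm : ∀ a b, fC a b = fC b a := by
  intro a b
  unfold fC
  by_cases h : a.2 = b.2
  · rw [if_pos h, if_pos h.symm]
  · rw [if_neg h, if_neg (fun h' => h h'.symm), abs_sub_comm]

theorem aEq (N : Int) (B C : List Int) :
    forest_diff_no_get N B C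
      = pairsSum fC ((PySem.List.pyRange 0 N 1).map
          (fun i => (PySem.List.pyGetD C i 0, PySem.List.pyGetD B i 0))) := by
  rw [forest_diff_no_get]
  set pairs := (PySem.List.pyRange 0 N 1).map
    (fun i => (PySem.List.pyGetD C i 0, PySem.List.pyGetD B i 0)) with hpairs
  set trees := PySem.List.sorted2 pairs Prod.fst Prod.snd false with htrees
  have hinv := aLoop_inv trees.length trees [] PySem.Dict.empty PySem.Dict.empty 0 le_rfl
    (by simp) (sorted2_fst_pairwise pairs) (by simp [PySem.Dict.getD_empty])
    (by simp [PySem.Dict.getD_empty]) (by simp [PySem.Dict.contains_empty])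
  simp only [List.length_nil, Nat.cast_zero, List.map_nil, List.sum_nil] at hinv
  rw [hinv, accPair_eq]
  simp only [List.nil_append, pairsSum, List.map_nil, List.sum_nil]
  rw [zero_add, sub_zero]
  exact pairsSum_perm fC fC_symm (PySem.List.sorted2_perm pairs Prod.fst Prod.snd false)

theorem sum_map_ite_unique (T : List Int) (a : Int) (w : Int) (g : Int → Int) :
    T.Nodup → a ∈ T →
    (T.map (fun t => if a = t then w + g t else g t)).sum = w + (T.map g).sum := by
  induction T with
  | nil => intro _ h; simp at h
  | cons t T ih =>
    intro hnd ha
    by_cases h : a = t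
    · subst h
      have hnot : a ∉ T := (List.nodup_cons.mp hnd).1
      rw [List.map_cons, List.sum_cons, if_pos rfl,
        List.map_congr_left (l := T) (f := fun t => if a = t then w + g t else g t) (g := g)
          (fun t' ht' => if_neg (fun h' => hnot (by rw [h']; exact ht')))]
      simp [add_assoc]
    · have haT : a ∈ T := by
        rcases List.mem_cons.mp ha with h1 | h1
        · exact absurd h1 h
        · exact h1
      rw [List.map_cons, List.sum_cons, if_neg h, ih (List.nodup_cons.mp hnd).2 haT,
        List.map_cons, List.sum_cons]
      ring

theorem sum_map_ite_zero_filter {α : Type} (p : α → Bool) (g : α → Int) (l : List α) :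
    (l.map (fun y => if p y = true then g y else 0)).sum = ((l.filter p).map g).sum := by
  induction l with
  | nil => simp
  | cons x xs ih =>
    by_cases h : p x = true
    · rw [List.map_cons, List.sum_cons, if_pos h, List.filter_cons, if_pos h,
        List.map_cons, List.sum_cons, ih]
    · rw [List.map_cons, List.sum_cons, if_neg h, List.filter_cons,
        if_neg h, ih]
      ring

-- within-type pair contribution of an ordered pair (earlier x, later y)
def fS (x y : Int × Int) : Int := if x.2 = y.2 then |y.1 - x.1| else 0

theorem typeSum (T : List Int) (hnd : T.Nodup) :
    ∀ (L : List (Int × Int)), (∀ p ∈ L, p.2 ∈ T) →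
    (T.map (fun t => pairsSum (fun p h => |h - p|)
        ((L.filter (fun p => p.2 == t)).map (fun p => p.1)))).sum
      = pairsSum fS L := by
  intro L
  induction L with
  | nil => intro _; simp [pairsSum]
  | cons x xs ih =>
    intro hmem
    have hx2 : x.2 ∈ T := hmem x (by simp)
    have hstep : ∀ t ∈ T,
        pairsSum (fun p h => |h - p|) (((x :: xs).filter (fun p => p.2 == t)).map (fun p => p.1))
        = if x.2 = t
          then ((xs.filter (fun p => p.2 == x.2)).map (fun y => |y.1 - x.1|)).sum
            + pairsSum (fun p h => |h - p|) ((xs.filter (fun p => p.2 == t)).map (fun p => p.1))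
          else pairsSum (fun p h => |h - p|) ((xs.filter (fun p => p.2 == t)).map (fun p => p.1)) := by
      intro t _
      by_cases h : x.2 = t
      · subst h
        rw [List.filter_cons, if_pos (by simp), List.map_cons, pairsSum, if_pos rfl,
          List.map_map]
        rfl
      · rw [List.filter_cons, if_neg (by simpa using h), if_neg h]
    rw [List.map_congr_left hstep,
      sum_map_ite_unique T x.2 _ _ hnd hx2,
      ih (fun p hp => hmem p (by simp [hp]))]
    rw [pairsSum]
    congr 1
    rw [← sum_map_ite_zero_filter (fun p => p.2 == x.2) (fun y => |y.1 - x.1|) xs]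
    refine congrArg List.sum (List.map_congr_left ?_)
    intro y _
    by_cases h : x.2 = y.2
    · rw [fS, if_pos h, if_pos (by simpa using h.symm)]
    · rw [fS, if_neg h, if_neg (by simpa using fun h' => h h'.symm)]

theorem foldl_sub {α : Type} (g : α → Int) (l : List α) :
    ∀ a : Int, l.foldl (fun a t => a - g t) a = a - (l.map g).sum := by
  induction l with
  | nil => intro a; simp
  | cons x xs ih => intro a; rw [List.foldl_cons, ih]; simp; ring

theorem altEq (N : Int) (B : List Int) (C : List Int) :
    forest_diff_no_get_alt N B C
      = pairsSum fC ((PySem.List.pyRange 0 N 1).map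
          (fun i => (PySem.List.pyGetD C i 0, PySem.List.pyGetD B i 0))) := by
  rw [forest_diff_no_get_alt]
  set pairs := (PySem.List.pyRange 0 N 1).map
    (fun i => (PySem.List.pyGetD C i 0, PySem.List.pyGetD B i 0)) with hpairs
  -- the building loop, re-read as a fold over the (height, type) pair list
  have hs : (PySem.List.pyRange 0 N 1).foldl
      (fun (s : List Int × PySem.Dict Int (List Int)) i =>
        (s.1 ++ [PySem.List.pyGetD C i 0],
         s.2.modify (PySem.List.pyGetD B i 0) [] (· ++ [PySem.List.pyGetD C i 0])))
      ([], PySem.Dict.empty)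
      = (pairs.map (fun p => p.1),
         pairs.foldl (fun d p => d.modify p.2 [] (· ++ [p.1])) PySem.Dict.empty) := by
    rw [hpairs, List.foldl_map,
      PySem.List.foldl_prod_mk (f := fun acc (i : Int) => acc ++ [PySem.List.pyGetD C i 0])
        (g := fun acc (i : Int) =>
          PySem.Dict.modify acc (PySem.List.pyGetD B i 0) [] (· ++ [PySem.List.pyGetD C i 0])),
      PySem.List.foldl_append_singleton_eq_map, List.nil_append]
    simp
  rw [hs]
  set D := pairs.foldl (fun d p => d.modify p.2 [] (· ++ [p.1])) PySem.Dict.empty with hD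
  have hkeys : D.keys = PySem.List.dedup (pairs.map (fun p => p.2)) := by
    rw [hD, PySem.Dict.keys_foldl_modify_key pairs (fun p => p.2) []
      (fun _ p => (· ++ [p.1])) PySem.Dict.empty, PySem.Dict.keys_empty,
      PySem.Set.update_nil_left, PySem.List.dedup_eq_ofList]
  have hnd : D.keys.Nodup := by
    rw [hkeys, PySem.List.dedup_eq_ofList]
    exact PySem.Set.nodup_ofList _
  have hget : ∀ t, D.getD t [] = (pairs.filter (fun p => p.2 == t)).map (fun p => p.1) := by
    intro t
    have hsw : D = (pairs.map (fun p => (p.2, p.1))).foldl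
        (fun d q => d.modify q.1 [] (· ++ [q.2])) PySem.Dict.empty := by
      simp only [hD, hpairs, List.foldl_map]
    rw [hsw, PySem.Dict.getD_foldl_modify_append, PySem.Dict.getD_empty, List.nil_append,
      List.filter_map, List.map_map]
    exact List.map_congr_left (fun p _ => rfl)
  have hvals : PySem.Dict.values D
      = (PySem.List.dedup (pairs.map (fun p => p.2))).map
          (fun t => (pairs.filter (fun p => p.2 == t)).map (fun p => p.1)) := by
    rw [PySem.Dict.values_eq_map_keys D hnd [], hkeys]
    exact List.map_congr_left (fun t _ => hget t)
  rw [hvals, foldl_sub]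
  have hTnd : (PySem.List.dedup (pairs.map (fun p => p.2))).Nodup := by
    rw [PySem.List.dedup_eq_ofList]
    exact PySem.Set.nodup_ofList _
  have hmem : ∀ p ∈ pairs, p.2 ∈ PySem.List.dedup (pairs.map (fun p => p.2)) := by
    intro p hp
    rw [PySem.List.mem_dedup]
    exact List.mem_map_of_mem hp
  have hT := typeSum (PySem.List.dedup (pairs.map (fun p => p.2))) hTnd pairs hmem
  have hbody : ((PySem.List.dedup (pairs.map (fun p => p.2))).map
        (fun t => (pairs.filter (fun p => p.2 == t)).map (fun p => p.1))).map bScan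
      = (PySem.List.dedup (pairs.map (fun p => p.2))).map
        (fun t => pairsSum (fun p h => |h - p|)
          ((pairs.filter (fun p => p.2 == t)).map (fun p => p.1))) := by
    rw [List.map_map]
    exact List.map_congr_left (fun t _ => bScan_eq _)
  rw [hbody, hT, bScan_eq, pairsSum_map]
  have hsplit : pairsSum (fun a b : Int × Int => |b.1 - a.1|) pairs
      = pairsSum fC pairs + pairsSum fS pairs := by
    rw [← pairsSum_add fC fS pairs]
    refine pairsSum_congr _ _ ?_ pairs
    intro a b
    by_cases h : a.2 = b.2
    · simp [fC, fS, h]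
    · simp [fC, fS, h]
  rw [hsplit]
  ring

-- ===== VERDICT (by name: the statement is the Claim_ definition above) =====
theorem forest_diff_no_get_spec : Claim_equal_forest_diff_no_get := by
  intro N B C _ _
  unfold Spec_forest_diff_no_get
  rw [aEq, altEq]
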